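-- pv_equiv track=rewrite | github.com/JDFagan/interview-in-python | questions/lsq.py | t9
-- ===== SOURCE A (Python) =====
-- def t9(digits, words):
--     keypad = {
--         1: set(),
--         2: {'a', 'b', 'c'},
--         3: {'d', 'e', 'f'},
--         4: {'g', 'h', 'i'},
--         5: {'j', 'k', 'l'},
--         6: {'m', 'n', 'o'},
--         7: {'p', 'q', 'r', 's'},
--         8: {'t', 'u', 'v'},
--         9: {'w', 'x', 'y', 'z'},
--         0: set(),
--     }
--
--     result = words
--     for i, digit in enumerate(digits):
--         not_matched = set()
--         for word in result:
--             if word[i] not in keypad[digit]: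
--                 not_matched.add(word)
--
--         result -= not_matched
--
--     return result
-- ===== SOURCE B (Python) =====
-- def t9(digits, words):
--     groups = ['', '', 'abc', 'def', 'ghi', 'jkl', 'mno', 'pqrs', 'tuv', 'wxyz']
--     inv = {c: d for d, g in enumerate(groups) for c in g}
--     target = list(digits)
--     n = len(target)
--     return {w for w in words if [inv.get(c) for c in w[:n]] == target}
-- ===== Notes on version B (the rewrite author's own statement) =====
-- stated objective: simpler
-- what changed: A repeatedly shrinks the word set digit-by-digit, building and subtracting a not_matched set at each position; B builds the inverse char-to-digit dict once and keeps, in one pass over the words, those whose first len(digits) characters map to exactly the digit sequence.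
import Mathlib
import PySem

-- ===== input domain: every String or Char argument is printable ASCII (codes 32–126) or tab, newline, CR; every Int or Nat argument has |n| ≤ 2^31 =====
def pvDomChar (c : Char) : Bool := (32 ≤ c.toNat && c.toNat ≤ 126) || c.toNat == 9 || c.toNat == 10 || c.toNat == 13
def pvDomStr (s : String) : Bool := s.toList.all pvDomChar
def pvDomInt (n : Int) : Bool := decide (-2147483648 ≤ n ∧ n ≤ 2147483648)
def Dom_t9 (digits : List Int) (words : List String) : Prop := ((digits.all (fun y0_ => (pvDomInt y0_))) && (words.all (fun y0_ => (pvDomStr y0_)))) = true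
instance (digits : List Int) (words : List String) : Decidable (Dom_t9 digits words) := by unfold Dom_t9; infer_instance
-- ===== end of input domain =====

-- B replaces A's digit-major set-shrinking loop by an inverse char→digit dict and one pass
-- over the words that compares the word's digit sequence with the target prefix (objective:
-- simpler).  Note: Python A mutates the `words` set in place (`result -= …` aliases it);
-- B does not — the equivalence proved here is about the RETURN value only.

-- ===== PORT A =====
def keypadA : PySem.Dict Int (PySem.Set Char) := PySem.Dict.ofList [
  (1, PySem.Set.empty),
  (2, PySem.Set.ofList ['a','b','c']),
  (3, PySem.Set.ofList ['d','e','f']),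
  (4, PySem.Set.ofList ['g','h','i']),
  (5, PySem.Set.ofList ['j','k','l']),
  (6, PySem.Set.ofList ['m','n','o']),
  (7, PySem.Set.ofList ['p','q','r','s']),
  (8, PySem.Set.ofList ['t','u','v']),
  (9, PySem.Set.ofList ['w','x','y','z']),
  (0, PySem.Set.empty)]

-- `word[i] not in keypad[digit]` for p = (i, digit).  `word[i]` is PySem.Str.pyGet?: the
-- `none` branch (Python IndexError) and a missing keypad key (Python KeyError, here getD's
-- default ∅) are excluded by Pre_t9.
def mismatchA (p : Int × Int) (word : String) : Bool :=
  match PySem.Str.pyGet? word p.1 with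
  | some c => !(PySem.Set.contains (PySem.Dict.getD keypadA p.2 PySem.Set.empty) c)
  | none => true

-- A, step for step: result starts as words; for each (i, digit) collect the non-matching
-- words into a set `not_matched` and subtract it from result.
def t9 (digits : List Int) (words : List String) : List String :=
  (PySem.List.enumerate digits).foldl (fun result p =>
    let not_matched := result.foldl (fun nm word =>
      if mismatchA p word then PySem.Set.add nm word else nm) PySem.Set.empty
    PySem.Set.diff result not_matched) words

-- ===== PORT B =====
-- inv = {c: d for d, g in enumerate(groups) for c in g}
def invB : PySem.Dict Char Int :=
  (PySem.List.enumerate ["", "", "abc", "def", "ghi", "jkl", "mno", "pqrs", "tuv", "wxyz"]).foldl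
    (fun d p => p.2.toList.foldl (fun d c => PySem.Dict.insert d c p.1) d) PySem.Dict.empty

-- {w for w in words if [inv.get(c) for c in w[:n]] == target}.  Python compares a list of
-- Optional[int] (None where inv has no key) with the int list `target`; since None never
-- equals an int, this is exactly the comparison against `digits.map some` below.
def t9_alt (digits : List Int) (words : List String) : List String :=
  let n : Int := digits.length
  PySem.Set.ofList (words.filter (fun w =>
    (PySem.List.slice w.toList none (some n)).map (fun c => PySem.Dict.get? invB c)
      == digits.map some))

-- ===== PRECONDITION & SPEC =====
-- keypad letters of a digit (empty for 0, 1 and for invalid digits); used only by Pre_t9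
def pvKeys (d : Int) : List Char :=
  if d = 2 then ['a','b','c'] else if d = 3 then ['d','e','f']
  else if d = 4 then ['g','h','i'] else if d = 5 then ['j','k','l']
  else if d = 6 then ['m','n','o'] else if d = 7 then ['p','q','r','s']
  else if d = 8 then ['t','u','v'] else if d = 9 then ['w','x','y','z'] else []

-- word w still survives before step i: its first i chars match digits[0..i-1]
def pvSurv (digits : List Int) (w : String) (i : Nat) : Bool :=
  (List.range i).all (fun j =>
    match w.toList[j]? with
    | some c => (pvKeys (digits.getD j 0)).contains c
    | none => false)

-- Pre_t9: `words` is a Python set (no duplicates), and A raises nothing: at every step i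
-- that still has surviving words, the digit is a keypad key (else KeyError) and every
-- surviving word is longer than i (else IndexError).  Exactly the inputs where A returns.
def Pre_t9 (digits : List Int) (words : List String) : Prop :=
  words.Nodup ∧
  ∀ i < digits.length, (∃ w ∈ words, pvSurv digits w i = true) →
    (0 ≤ digits.getD i 0 ∧ digits.getD i 0 ≤ 9 ∧
     ∀ w ∈ words, pvSurv digits w i = true → i < w.toList.length)
instance (digits : List Int) (words : List String) : Decidable (Pre_t9 digits words) := by
  unfold Pre_t9; infer_instance

def pvWitness_t9 : List Int × List String := ([2, 3], ["ad", "be", "xy"])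

def Spec_t9 (digits : List Int) (words : List String) (out : List String) : Prop := out = t9_alt digits words
instance (digits : List Int) (words : List String) (out : List String) : Decidable (Spec_t9 digits words out) := by unfold Spec_t9; infer_instance

-- ===== CLAIM (what is proved, stated in full; the proofs are below) =====
def Claim_equal_t9 : Prop := ∀ (digits : List Int) (words : List String), Dom_t9 digits words → Pre_t9 digits words → Spec_t9 digits words (t9 digits words)

-- ===== LEMMAS AND PROOFS =====

-- membership in a set built by a conditional-add fold
theorem mem_foldl_add_if {α : Type} [BEq α] [LawfulBEq α] (f : α → Bool) (l : List α)
    (s0 : PySem.Set α) (y : α) :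
    y ∈ l.foldl (fun s x => if f x then PySem.Set.add s x else s) s0
      ↔ y ∈ s0 ∨ (y ∈ l ∧ f y = true) := by
  induction l generalizing s0 with
  | nil => simp
  | cons x xs ih =>
    simp only [List.foldl_cons]
    by_cases hfx : f x = true
    · rw [if_pos hfx, ih]
      simp only [PySem.Set.mem_add, List.mem_cons]
      by_cases hyx : y = x
      · subst hyx; simp [hfx]
      · tauto
    · simp only [Bool.not_eq_true] at hfx
      rw [if_neg (by simp [hfx]), ih]
      simp only [List.mem_cons]
      by_cases hyx : y = x
      · subst hyx; simp [hfx]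
      · tauto

-- the contains test on such a set
theorem contains_foldl_add_if {α : Type} [BEq α] [LawfulBEq α] [DecidableEq α]
    (f : α → Bool) (l : List α) (y : α) :
    PySem.Set.contains (l.foldl (fun s x => if f x then PySem.Set.add s x else s)
      PySem.Set.empty) y = (decide (y ∈ l) && f y) := by
  rw [Bool.eq_iff_iff, PySem.Set.contains_iff, mem_foldl_add_if]
  simp [PySem.Set.empty]

-- one step of A's loop is a filter by the per-position test
theorem step_eq_filter (p : Int × Int) (result : List String) :
    PySem.Set.diff result (result.foldl (fun nm word =>
      if mismatchA p word then PySem.Set.add nm word else nm) PySem.Set.empty)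
    = result.filter (fun w => !(mismatchA p w)) := by
  unfold PySem.Set.diff
  apply List.filter_congr
  intro w hw
  rw [contains_foldl_add_if]
  simp [hw]

-- A's whole loop filters by the conjunction of the per-position tests
theorem foldl_eq_filter_all (l : List (Int × Int)) (ws : List String) :
    l.foldl (fun result p =>
      PySem.Set.diff result (result.foldl (fun nm word =>
        if mismatchA p word then PySem.Set.add nm word else nm) PySem.Set.empty)) ws
    = ws.filter (fun w => l.all (fun p => !(mismatchA p w))) := by
  induction l generalizing ws with
  | nil => simp
  | cons p l ih =>
    rw [List.foldl_cons, step_eq_filter, ih, List.filter_filter]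
    apply List.filter_congr
    intro w _
    rw [List.all_cons, Bool.and_comm]

theorem kk : keypadA = PySem.Dict.mk [(1,[]),(2,['a','b','c']),(3,['d','e','f']),(4,['g','h','i']),(5,['j','k','l']),(6,['m','n','o']),(7,['p','q','r','s']),(8,['t','u','v']),(9,['w','x','y','z']),(0,[])] := by decide

-- keypad lookup, evaluated: pvKeys (the default ∅ for a non-key digit included)
theorem keypadA_getD (d : Int) : PySem.Dict.getD keypadA d PySem.Set.empty = pvKeys d := by
  by_cases h0 : d = 0
  · subst h0; rw [kk]; decide
  by_cases h1 : d = 1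
  · subst h1; rw [kk]; decide
  by_cases h2 : d = 2
  · subst h2; rw [kk]; decide
  by_cases h3 : d = 3
  · subst h3; rw [kk]; decide
  by_cases h4 : d = 4
  · subst h4; rw [kk]; decide
  by_cases h5 : d = 5
  · subst h5; rw [kk]; decide
  by_cases h6 : d = 6
  · subst h6; rw [kk]; decide
  by_cases h7 : d = 7
  · subst h7; rw [kk]; decide
  by_cases h8 : d = 8
  · subst h8; rw [kk]; decide
  by_cases h9 : d = 9
  · subst h9; rw [kk]; decide
  rw [kk]
  have e0 : ((0:Int) == d) = false := beq_eq_false_iff_ne.mpr (Ne.symm h0)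
  have e1 : ((1:Int) == d) = false := beq_eq_false_iff_ne.mpr (Ne.symm h1)
  have e2 : ((2:Int) == d) = false := beq_eq_false_iff_ne.mpr (Ne.symm h2)
  have e3 : ((3:Int) == d) = false := beq_eq_false_iff_ne.mpr (Ne.symm h3)
  have e4 : ((4:Int) == d) = false := beq_eq_false_iff_ne.mpr (Ne.symm h4)
  have e5 : ((5:Int) == d) = false := beq_eq_false_iff_ne.mpr (Ne.symm h5)
  have e6 : ((6:Int) == d) = false := beq_eq_false_iff_ne.mpr (Ne.symm h6)
  have e7 : ((7:Int) == d) = false := beq_eq_false_iff_ne.mpr (Ne.symm h7)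
  have e8 : ((8:Int) == d) = false := beq_eq_false_iff_ne.mpr (Ne.symm h8)
  have e9 : ((9:Int) == d) = false := beq_eq_false_iff_ne.mpr (Ne.symm h9)
  simp [PySem.Dict.getD, PySem.Dict.get?, List.find?, pvKeys, PySem.Set.empty,
    e0, e1, e2, e3, e4, e5, e6, e7, e8, e9, h2, h3, h4, h5, h6, h7, h8, h9]


-- the inverse dict, evaluated to its literal items
theorem invB_eq : invB = PySem.Dict.mk
    [('a',2),('b',2),('c',2),('d',3),('e',3),('f',3),('g',4),('h',4),('i',4),
     ('j',5),('k',5),('l',5),('m',6),('n',6),('o',6),('p',7),('q',7),('r',7),('s',7),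
     ('t',8),('u',8),('v',8),('w',9),('x',9),('y',9),('z',9)] := by
  set_option maxHeartbeats 2000000 in decide

theorem get?_beq_any (l : List (Char × Int)) (c : Char) (d : Int)
    (hl : (l.map Prod.fst).Nodup) :
    (PySem.Dict.get? (PySem.Dict.mk l) c == some d) = l.any (fun p => p.1 == c && p.2 == d) := by
  induction l with
  | nil => rfl
  | cons p rest ih =>
    obtain ⟨k, v⟩ := p
    rw [PySem.Dict.get?_mk_cons]
    simp only [List.map_cons, List.nodup_cons] at hl
    by_cases h : k = c
    · subst h
      have hrest : rest.any (fun p => p.1 == k && p.2 == d) = false := by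
        rw [List.any_eq_false]
        intro p hp
        simp only [Bool.and_eq_true, beq_iff_eq, not_and]
        intro h1 _
        exact hl.1 (by rw [← h1]; exact List.mem_map_of_mem hp)
      simp [List.any_cons, hrest]
    · have hkc : (k == c) = false := beq_eq_false_iff_ne.mpr h
      simp [hkc, List.any_cons, ih hl.2]

theorem invB_get_eq_keypad (c : Char) (d : Int) :
    (PySem.Dict.get? invB c == some d)
      = PySem.Set.contains (PySem.Dict.getD keypadA d PySem.Set.empty) c := by
  rw [keypadA_getD, invB_eq, get?_beq_any _ _ _ (by decide)]
  by_cases h0 : d = 0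
  · subst h0
    rw [Bool.eq_iff_iff]
    simp [List.any_cons, pvKeys]
    try tauto
  by_cases h1 : d = 1
  · subst h1
    rw [Bool.eq_iff_iff]
    simp [List.any_cons, pvKeys]
    try tauto
  by_cases h2 : d = 2
  · subst h2
    rw [Bool.eq_iff_iff]
    simp [List.any_cons, pvKeys]
    try tauto
  by_cases h3 : d = 3
  · subst h3
    rw [Bool.eq_iff_iff]
    simp [List.any_cons, pvKeys]
    try tauto
  by_cases h4 : d = 4
  · subst h4
    rw [Bool.eq_iff_iff]
    simp [List.any_cons, pvKeys]
    try tauto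
  by_cases h5 : d = 5
  · subst h5
    rw [Bool.eq_iff_iff]
    simp [List.any_cons, pvKeys]
    try tauto
  by_cases h6 : d = 6
  · subst h6
    rw [Bool.eq_iff_iff]
    simp [List.any_cons, pvKeys]
    try tauto
  by_cases h7 : d = 7
  · subst h7
    rw [Bool.eq_iff_iff]
    simp [List.any_cons, pvKeys]
    try tauto
  by_cases h8 : d = 8
  · subst h8
    rw [Bool.eq_iff_iff]
    simp [List.any_cons, pvKeys]
    try tauto
  by_cases h9 : d = 9
  · subst h9
    rw [Bool.eq_iff_iff]
    simp [List.any_cons, pvKeys]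
    try tauto
  rw [Bool.eq_iff_iff]
  simp [List.any_cons, beq_iff_eq, pvKeys, h2, h3, h4, h5, h6, h7, h8, h9,
    Ne.symm h2, Ne.symm h3, Ne.symm h4, Ne.symm h5, Ne.symm h6,
    Ne.symm h7, Ne.symm h8, Ne.symm h9]

-- A's all-positions test, started at position s, is B's prefix comparison from position s
theorem enumAll_eq_prefix (ds : List Int) (w : String) (s : Nat) :
    (PySem.List.enumerate ds (s : Int)).all (fun p => !(mismatchA p w))
    = (((w.toList.drop s).take ds.length).map (fun c => PySem.Dict.get? invB c)
        == ds.map some) := by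
  induction ds generalizing s with
  | nil => simp [PySem.List.enumerate_nil]
  | cons d ds ih =>
    rw [PySem.List.enumerate_cons, List.all_cons]
    have hc : ((s : Int) + 1) = ((s + 1 : Nat) : Int) := by push_cast; ring
    rw [hc, ih]
    unfold mismatchA
    cases h : w.toList[s]? with
    | none =>
      have hlen : w.toList.length ≤ s := List.getElem?_eq_none_iff.mp h
      rw [List.drop_eq_nil_of_le hlen]
      simp [h]
    | some c =>
      obtain ⟨hlt, hget⟩ := List.getElem?_eq_some_iff.mp h
      rw [List.drop_eq_getElem_cons hlt, hget]
      simp only [PySem.Str.pyGet?_natCast, h, List.length_cons, List.take_succ_cons,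
        List.map_cons, List.map_cons, List.cons_beq_cons]
      rw [← invB_get_eq_keypad c d]
      cases hbq : (PySem.Dict.get? invB c == some d) <;> simp

-- ===== VERDICT (by name: the statement is the Claim_ definition above) =====
theorem t9_spec : Claim_equal_t9 := by
  intro digits words _ hpre
  unfold Spec_t9 t9 t9_alt
  rw [foldl_eq_filter_all]
  have hfe : ∀ w ∈ words,
      (PySem.List.enumerate digits).all (fun p => !(mismatchA p w))
      = ((PySem.List.slice w.toList none (some (digits.length : Int))).map
          (fun c => PySem.Dict.get? invB c) == digits.map some) := by
    intro w _
    rw [PySem.List.slice_to_natCast]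
    have := enumAll_eq_prefix digits w 0
    simpa using this
  rw [List.filter_congr hfe]
  exact (PySem.Set.ofList_eq_self_of_nodup _ (hpre.1.filter _)).symm
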